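-- pv_equiv track=rewrite | github.com/gsbrodal/sea25 | code/generate-tikz-figures.py | tikz
-- ===== SOURCE A (Python) =====
-- def tikz(A):
--   n = len(A) - 1
--
--   S = ', '.join(f'{i}/{A[i]}' for i in range(1, n + 1) if A[i] <= i)
--   forwards = ', '. join(f'{i}/{A[i]}' for i in range(1, n + 1) if A[i] > i)
--   backwards = ', '. join(f'{i}/{A[i]}' for i in range(1, n + 1) if A[i] < i)
--
--   return r'''\begin{tikzpicture}[scale=0.5]
--   \draw (0.5,0) rectangle (''' + str(n) + r'''.5,1);
--   \foreach \i in {1, ..., ''' + str(n-1) + r'''} \draw (\i+0.5, 0) -- ++(0, 1);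
--   \foreach \i in {1, ..., ''' + str(n) + r'''} \node at (\i, 1.5) {\scriptsize \i};
--   \foreach \i/\j in {''' + forwards + r'''} {
--     \node at (\i, 0.5) {\j};
--     \path[-latex] (\i, -0.1) edge[bend right=30] (\j, -0.1);
--   }''' + ('' if not backwards else r'''
--   \foreach \i/\j in {''' + backwards + r'''} {
--     \path[-latex] (\i, 1.9) edge[bend right=30] (\j, 1.9);
--   }''') + r'''
--   \foreach \i/\j in {''' + S + r'''} \node at (\i, 0.5) {\textbf{\j}};
--   \node at (-0.25, 0.5) {$A$};
-- \end{tikzpicture}'''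
-- ===== SOURCE B (Python) =====
-- def tikz(A):
--   n = len(A) - 1
--   S = forwards = backwards = ''
--   for i in range(1, n + 1):
--     lab = f'{i}/{A[i]}'
--     if A[i] <= i:
--       if S: S += ', '
--       S += lab
--     else:
--       if forwards: forwards += ', '
--       forwards += lab
--     if A[i] < i:
--       if backwards: backwards += ', '
--       backwards += lab
--   return r'''\begin{tikzpicture}[scale=0.5]
--   \draw (0.5,0) rectangle (''' + str(n) + r'''.5,1);
--   \foreach \i in {1, ..., ''' + str(n - 1) + r'''} \draw (\i+0.5, 0) -- ++(0, 1);
--   \foreach \i in {1, ..., ''' + str(n) + r'''} \node at (\i, 1.5) {\scriptsize \i};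
--   \foreach \i/\j in {''' + forwards + r'''} {
--     \node at (\i, 0.5) {\j};
--     \path[-latex] (\i, -0.1) edge[bend right=30] (\j, -0.1);
--   }''' + ('' if not backwards else r'''
--   \foreach \i/\j in {''' + backwards + r'''} {
--     \path[-latex] (\i, 1.9) edge[bend right=30] (\j, 1.9);
--   }''') + r'''
--   \foreach \i/\j in {''' + S + r'''} \node at (\i, 0.5) {\textbf{\j}};
--   \node at (-0.25, 0.5) {$A$};
-- \end{tikzpicture}'''
-- ===== Notes on version B (the rewrite author's own statement) =====
-- stated objective: alternative
-- what changed: B replaces A's three filtered generator passes plus ', '.join by a single pass over range(1, n+1) that builds the three comma-separated strings directly by in-place string appends, with no intermediate lists and no join.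
import Mathlib
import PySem

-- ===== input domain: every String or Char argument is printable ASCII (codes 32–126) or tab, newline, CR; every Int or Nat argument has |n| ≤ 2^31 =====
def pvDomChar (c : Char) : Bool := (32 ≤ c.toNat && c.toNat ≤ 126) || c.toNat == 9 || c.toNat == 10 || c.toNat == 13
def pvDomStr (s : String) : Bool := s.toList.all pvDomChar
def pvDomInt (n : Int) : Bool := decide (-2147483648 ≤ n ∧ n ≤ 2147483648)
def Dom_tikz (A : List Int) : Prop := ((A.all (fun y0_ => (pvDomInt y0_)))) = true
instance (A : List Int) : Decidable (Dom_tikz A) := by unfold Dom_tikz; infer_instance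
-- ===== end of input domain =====

-- B replaces A's three filtered generator passes + ', '.join by ONE pass over range(1, n+1)
-- that builds the three comma-separated strings directly by in-place appends (no lists,
-- no join). Objective: alternative.

-- fixed template pieces shared by both ports (they are the raw literals of the sources)
def tikzP1 : String := "\\begin{tikzpicture}[scale=0.5]\n  \\draw (0.5,0) rectangle ("
def tikzP2 : String := ".5,1);\n  \\foreach \\i in {1, ..., "
def tikzP3 : String := "} \\draw (\\i+0.5, 0) -- ++(0, 1);\n  \\foreach \\i in {1, ..., "
def tikzP4 : String := "} \\node at (\\i, 1.5) {\\scriptsize \\i};\n  \\foreach \\i/\\j in {"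
def tikzP5 : String := "} {\n    \\node at (\\i, 0.5) {\\j};\n    \\path[-latex] (\\i, -0.1) edge[bend right=30] (\\j, -0.1);\n  }"
def tikzPB1 : String := "\n  \\foreach \\i/\\j in {"
def tikzPB2 : String := "} {\n    \\path[-latex] (\\i, 1.9) edge[bend right=30] (\\j, 1.9);\n  }"
def tikzP6 : String := "\n  \\foreach \\i/\\j in {"
def tikzP7 : String := "} \\node at (\\i, 0.5) {\\textbf{\\j}};\n  \\node at (-0.25, 0.5) {$A$};\n\\end{tikzpicture}"

-- ===== PORT A =====
-- f'{i}/{A[i]}'; the index i is always in range (1 ≤ i ≤ len(A)-1), so pyGetD is exact here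
def tikzLab (A : List Int) (i : Int) : String :=
  PySem.Int.toStr i ++ "/" ++ PySem.Int.toStr (PySem.List.pyGetD A i 0)

def tikz (A : List Int) : String :=
  let n : Int := (A.length : Int) - 1
  let S := PySem.Str.join ", "
    (((PySem.List.pyRange 1 (n+1) 1).filter (fun i => PySem.List.pyGetD A i 0 ≤ i)).map (tikzLab A))
  let forwards := PySem.Str.join ", "
    (((PySem.List.pyRange 1 (n+1) 1).filter (fun i => i < PySem.List.pyGetD A i 0)).map (tikzLab A))
  let backwards := PySem.Str.join ", "
    (((PySem.List.pyRange 1 (n+1) 1).filter (fun i => PySem.List.pyGetD A i 0 < i)).map (tikzLab A))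
  tikzP1 ++ PySem.Int.toStr n ++ tikzP2 ++ PySem.Int.toStr (n-1) ++ tikzP3 ++ PySem.Int.toStr n
    ++ tikzP4 ++ forwards ++ tikzP5
    ++ (if backwards = "" then "" else tikzPB1 ++ backwards ++ tikzPB2)
    ++ tikzP6 ++ S ++ tikzP7

-- ===== PORT B =====
-- the loop body of Source B: 'if S: S += ", "' then 'S += lab' on the right running string(s)
def tikzStepB (A : List Int) (acc : String × String × String) (i : Int) :
    String × String × String :=
  let v := PySem.List.pyGetD A i 0
  let lab := PySem.Int.toStr i ++ "/" ++ PySem.Int.toStr v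
  let acc1 :=
    if v ≤ i then ((if acc.1 = "" then acc.1 else acc.1 ++ ", ") ++ lab, acc.2.1, acc.2.2)
    else (acc.1, (if acc.2.1 = "" then acc.2.1 else acc.2.1 ++ ", ") ++ lab, acc.2.2)
  if v < i then (acc1.1, acc1.2.1, (if acc1.2.2 = "" then acc1.2.2 else acc1.2.2 ++ ", ") ++ lab)
  else acc1

def tikz_alt (A : List Int) : String :=
  let n : Int := (A.length : Int) - 1
  let r := (PySem.List.pyRange 1 (n+1) 1).foldl (tikzStepB A) ("", "", "")
  let S := r.1
  let forwards := r.2.1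
  let backwards := r.2.2
  tikzP1 ++ PySem.Int.toStr n ++ tikzP2 ++ PySem.Int.toStr (n-1) ++ tikzP3 ++ PySem.Int.toStr n
    ++ tikzP4 ++ forwards ++ tikzP5
    ++ (if backwards = "" then "" else tikzPB1 ++ backwards ++ tikzPB2)
    ++ tikzP6 ++ S ++ tikzP7

-- ===== PRECONDITION & SPEC =====
def Spec_tikz (A : List Int) (out : String) : Prop := out = tikz_alt A
instance (A : List Int) (out : String) : Decidable (Spec_tikz A out) := by unfold Spec_tikz; infer_instance

-- ===== CLAIM =====
def Claim_equal_tikz : Prop := ∀ (A : List Int), Dom_tikz A → Spec_tikz A (tikz A)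

-- ===== LEMMAS AND PROOFS =====

-- 'append j to a running comma-separated string s' (j = "" appends nothing)
def strApp (s j : String) : String :=
  if j = "" then s else (if s = "" then "" else s ++ ", ") ++ j

-- every label 'i/A[i]' is a nonempty string
theorem tikzLab_ne (A : List Int) (i : Int) : tikzLab A i ≠ "" := by
  intro h
  have := congrArg String.toList h
  simp [tikzLab, String.toList_append] at this

theorem append_ne_empty_right (s t : String) (ht : t ≠ "") : s ++ t ≠ "" := by
  intro h
  have h' := congrArg String.toList h
  rw [String.toList_append, String.toList_empty] at h'
  exact ht (String.toList_inj.mp (by simp [(List.append_eq_nil_iff.mp h').2]))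

theorem strApp_assoc (s t u : String) (ht : t ≠ "") :
    strApp (strApp s t) u = strApp s (strApp t u) := by
  unfold strApp
  by_cases hu : u = ""
  · simp [hu, ht]
  · have h1 : (if s = "" then "" else s ++ ", ") ++ t ≠ "" := append_ne_empty_right _ _ ht
    have h2 : (if t = "" then "" else t ++ ", ") ++ u ≠ "" := append_ne_empty_right _ _ hu
    simp only [hu, ht, if_false, h1]
    apply String.toList_inj.mp
    by_cases hs : s = "" <;> simp [hs, String.toList_append]

theorem strApp_empty_left (j : String) : strApp "" j = j := by
  unfold strApp
  by_cases hj : j = ""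
  · simp [hj]
  · simp only [hj, if_false]
    exact String.toList_inj.mp (by simp)

-- joining one more label is exactly strApp of the label and the joined rest
theorem join_cons_lab (A : List Int) (x : Int) (xs : List Int) :
    PySem.Str.join ", " (tikzLab A x :: xs.map (tikzLab A)) =
      strApp (tikzLab A x) (PySem.Str.join ", " (xs.map (tikzLab A))) := by
  unfold strApp
  cases xs with
  | nil =>
    rw [List.map_nil, if_pos (by rfl)]
    apply String.toList_inj.mp
    rw [PySem.Str.toList_join]
    simp [PySem.Chars.join_singleton]
  | cons y ys =>
    have hne : PySem.Str.join ", " ((y :: ys).map (tikzLab A)) ≠ "" := by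
      intro h
      have h' := congrArg String.toList h
      rw [PySem.Str.toList_join] at h'
      simp only [List.map_cons] at h'
      cases ys with
      | nil =>
        simp only [List.map_nil, PySem.Chars.join_singleton] at h'
        exact tikzLab_ne A y (String.toList_inj.mp (by simpa using h'))
      | cons z zs =>
        simp only [List.map_cons] at h'
        rw [PySem.Chars.join_cons_cons] at h'
        simp only [String.toList_empty] at h'
        rcases List.append_eq_nil_iff.mp h' with ⟨h1, -⟩
        rcases List.append_eq_nil_iff.mp h1 with ⟨h2, -⟩
        exact tikzLab_ne A y (String.toList_inj.mp (by simpa using h2))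
    rw [if_neg hne, if_neg (tikzLab_ne A x)]
    apply String.toList_inj.mp
    rw [PySem.Str.toList_join]
    simp only [List.map_cons]
    rw [PySem.Chars.join_cons_cons]
    simp [PySem.Str.toList_join, String.toList_append]

-- the loop body is strApp of the label on the matching components
theorem step_as_strApp (A : List Int) (s f b : String) (x : Int) :
    tikzStepB A (s, f, b) x =
      (if PySem.List.pyGetD A x 0 ≤ x then strApp s (tikzLab A x) else s,
       if x < PySem.List.pyGetD A x 0 then strApp f (tikzLab A x) else f,
       if PySem.List.pyGetD A x 0 < x then strApp b (tikzLab A x) else b) := by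
  unfold tikzStepB strApp tikzLab
  rcases lt_trichotomy (PySem.List.pyGetD A x 0) x with h | h | h
  · simp only [le_of_lt h, not_lt.mpr (le_of_lt h), h, if_true, if_false]
    split_ifs <;> simp_all
  · simp only [h, le_refl, lt_irrefl, if_true, if_false]
    split_ifs <;> simp_all
  · simp only [not_le.mpr h, not_lt.mpr (le_of_lt h), h, if_true, if_false]
    split_ifs <;> simp_all

-- the single pass computes strApp of the start strings and the three joined filtered lists
theorem tikz_foldl_strs (A : List Int) (l : List Int) (s f b : String) :
    l.foldl (tikzStepB A) (s, f, b) =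
      (strApp s (PySem.Str.join ", " ((l.filter (fun i => PySem.List.pyGetD A i 0 ≤ i)).map (tikzLab A))),
       strApp f (PySem.Str.join ", " ((l.filter (fun i => i < PySem.List.pyGetD A i 0)).map (tikzLab A))),
       strApp b (PySem.Str.join ", " ((l.filter (fun i => PySem.List.pyGetD A i 0 < i)).map (tikzLab A)))) := by
  induction l generalizing s f b with
  | nil => simp [strApp, show PySem.Str.join ", " ([] : List String) = "" from rfl]
  | cons x xs ih =>
    simp only [List.foldl_cons, List.filter_cons, step_as_strApp, ih]
    rcases lt_trichotomy (PySem.List.pyGetD A x 0) x with h | h | h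
    · simp [le_of_lt h, not_lt.mpr (le_of_lt h), h, join_cons_lab,
        strApp_assoc _ _ _ (tikzLab_ne A x)]
    · simp [h, join_cons_lab, strApp_assoc _ _ _ (tikzLab_ne A x)]
    · simp [not_le.mpr h, not_lt.mpr (le_of_lt h), h, join_cons_lab,
        strApp_assoc _ _ _ (tikzLab_ne A x)]

-- ===== VERDICT =====
theorem tikz_spec : Claim_equal_tikz := by
  intro A _
  unfold Spec_tikz tikz tikz_alt
  simp only [tikz_foldl_strs, strApp_empty_left]
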